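-- pv_equiv track=rewrite | github.com/MIchael-wufan/shushi | division_vertical_mcp/compose.py | _dividend_shifted_extension_red_digit_cells
-- ===== SOURCE A (Python) =====
-- def _dividend_shifted_extension_red_digit_cells(ds: str, dec_after: int, extra_trailing_zeros: int) -> list[int]:
--     """与 `_dividend_cells_shifted_digits` 一致布局下，续除补在尾部的 `0` 所在 cell 下标（与新增小数点同色）。"""
--     if extra_trailing_zeros <= 0:
--         return []
--     body = ds + ("0" * extra_trailing_zeros)
--     red: list[int] = []
--     ci = 0
--     for j, ch in enumerate(body):
--         if j == dec_after:
--             ci += 1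
--         if ch == "0" and j >= len(ds):
--             red.append(ci)
--         ci += 1
--     return red
-- ===== SOURCE B (Python) =====
-- def _dividend_shifted_extension_red_digit_cells(ds: str, dec_after: int, extra_trailing_zeros: int) -> list[int]:
--     if extra_trailing_zeros <= 0:
--         return []
--     n = len(ds)
--     return [j + (1 if 0 <= dec_after <= j else 0)
--             for j in range(n, n + extra_trailing_zeros)]
-- ===== Notes on version B (the rewrite author's own statement) =====
-- stated objective: faster
-- what changed: B replaces A's per-character scan of ds++zeros with a closed-form index formula j + (1 if 0 <= dec_after <= j else 0) over only the trailing-zero positions.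
import Mathlib
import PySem

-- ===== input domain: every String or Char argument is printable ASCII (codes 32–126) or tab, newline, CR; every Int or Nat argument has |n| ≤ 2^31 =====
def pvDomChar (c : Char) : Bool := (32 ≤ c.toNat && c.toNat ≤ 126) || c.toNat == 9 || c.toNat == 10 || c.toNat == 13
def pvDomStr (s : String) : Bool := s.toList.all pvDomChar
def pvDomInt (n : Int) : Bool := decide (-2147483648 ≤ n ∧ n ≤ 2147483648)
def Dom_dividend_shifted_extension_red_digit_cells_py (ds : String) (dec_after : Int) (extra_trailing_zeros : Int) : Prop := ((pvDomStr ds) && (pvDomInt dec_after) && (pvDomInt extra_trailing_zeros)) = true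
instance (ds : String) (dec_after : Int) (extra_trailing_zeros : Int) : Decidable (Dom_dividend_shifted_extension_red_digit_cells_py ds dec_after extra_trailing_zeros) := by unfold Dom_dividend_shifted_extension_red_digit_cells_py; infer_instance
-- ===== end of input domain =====

-- B replaces A's scan over ds++zeros by the closed-form cell index j + (1 if 0 <= dec_after <= j) over only the trailing-zero positions (timed faster by the check).
-- ===== PORT A =====
-- A's loop over enumerate(body): index j, counter ci, accumulator red, step for step.
def pvLoopA (n dec_after : Int) : List Char → Int → Int → List Int → List Int
  | [], _, _, red => red
  | ch :: rest, j, ci, red =>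
      let ci' := if j == dec_after then ci + 1 else ci
      let red' := if ch == '0' && decide (j ≥ n) then red ++ [ci'] else red
      pvLoopA n dec_after rest (j + 1) (ci' + 1) red'

def dividend_shifted_extension_red_digit_cells_py (ds : String) (dec_after : Int) (extra_trailing_zeros : Int) : List Int :=
  if extra_trailing_zeros ≤ 0 then []
  else
    let body := ds.toList ++ List.replicate extra_trailing_zeros.toNat '0'
    pvLoopA (PySem.Str.len ds) dec_after body 0 0 []

-- ===== PORT B =====
def dividend_shifted_extension_red_digit_cells_py_alt (ds : String) (dec_after : Int) (extra_trailing_zeros : Int) : List Int :=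
  if extra_trailing_zeros ≤ 0 then []
  else
    let n := PySem.Str.len ds
    (PySem.List.pyRange n (n + extra_trailing_zeros) 1).map
      (fun j => j + if 0 ≤ dec_after ∧ dec_after ≤ j then 1 else 0)

-- ===== PRECONDITION & SPEC =====
def Spec_dividend_shifted_extension_red_digit_cells_py (ds : String) (dec_after : Int) (extra_trailing_zeros : Int) (out : List Int) : Prop := out = dividend_shifted_extension_red_digit_cells_py_alt ds dec_after extra_trailing_zeros
instance (ds : String) (dec_after : Int) (extra_trailing_zeros : Int) (out : List Int) : Decidable (Spec_dividend_shifted_extension_red_digit_cells_py ds dec_after extra_trailing_zeros out) := by unfold Spec_dividend_shifted_extension_red_digit_cells_py; infer_instance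

-- ===== CLAIM (what is proved, stated in full; the proofs are below) =====
def Claim_equal_dividend_shifted_extension_red_digit_cells_py : Prop := ∀ (ds : String) (dec_after : Int) (extra_trailing_zeros : Int), Dom_dividend_shifted_extension_red_digit_cells_py ds dec_after extra_trailing_zeros → Spec_dividend_shifted_extension_red_digit_cells_py ds dec_after extra_trailing_zeros (dividend_shifted_extension_red_digit_cells_py ds dec_after extra_trailing_zeros)

-- ===== LEMMAS AND PROOFS =====

-- Processing a prefix of characters whose indices are all < n only advances the
-- counters: ci grows by one per char, plus one extra if dec_after is crossed.
lemma pvLoopA_prefix (n d : Int) (xs : List Char) (ys : List Char) (j ci : Int) (red : List Int)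
    (h : j + xs.length ≤ n) :
    pvLoopA n d (xs ++ ys) j ci red =
      pvLoopA n d ys (j + xs.length) (ci + xs.length + (if j ≤ d ∧ d < j + xs.length then 1 else 0)) red := by
  induction xs generalizing j ci with
  | nil =>
      simp only [List.nil_append, List.length_nil, Nat.cast_zero, add_zero]
      rw [if_neg (by omega), add_zero]
  | cons c rest ih =>
      have hlen : j + ((rest.length : Int) + 1) ≤ n := by
        simp only [List.length_cons] at h; push_cast at h; omega
      simp only [List.cons_append, pvLoopA, List.length_cons]
      have hj : ¬ (c == '0' && decide (j ≥ n)) = true := by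
        simp only [Bool.and_eq_true, decide_eq_true_eq, not_and]
        intro _; omega
      rw [if_neg hj]
      by_cases hd : j = d
      · rw [if_pos (by simpa using hd)]
        rw [ih (j + 1) (ci + 1 + 1) (by omega)]
        rw [if_neg (by omega : ¬ (j + 1 ≤ d ∧ d < j + 1 + (rest.length : Int)))]
        simp only [Nat.cast_add, Nat.cast_one]
        rw [if_pos (by omega : j ≤ d ∧ d < j + ((rest.length : Int) + 1))]
        rw [show j + ((rest.length : Int) + 1) = j + 1 + (rest.length : Int) from by ring]
        rw [show ci + ((rest.length : Int) + 1) + 1 = ci + 1 + 1 + (rest.length : Int) + 0 from by ring]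
      · rw [if_neg (by simpa using hd)]
        rw [ih (j + 1) (ci + 1) (by omega)]
        simp only [Nat.cast_add, Nat.cast_one]
        have he : (if j + 1 ≤ d ∧ d < j + 1 + (rest.length : Int) then (1:Int) else 0)
            = (if j ≤ d ∧ d < j + ((rest.length : Int) + 1) then (1:Int) else 0) := by
          by_cases h1 : j + 1 ≤ d ∧ d < j + 1 + (rest.length : Int)
          · rw [if_pos h1, if_pos (by omega)]
          · rw [if_neg h1, if_neg (by omega)]
        rw [← he]
        rw [show j + ((rest.length : Int) + 1) = j + 1 + (rest.length : Int) from by ring]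
        rw [show ci + ((rest.length : Int) + 1) = ci + 1 + (rest.length : Int) from by ring]

-- Processing k zeros starting at index j ≥ n ≥ 0, with ci at its invariant
-- value, appends exactly the closed-form cells of B.
lemma pvLoopA_zeros (n d : Int) (k : Nat) (j : Int) (red : List Int)
    (hn : 0 ≤ n) (hj : n ≤ j) :
    pvLoopA n d (List.replicate k '0') j (j + (if 0 ≤ d ∧ d < j then 1 else 0)) red =
      red ++ (PySem.List.pyRange j (j + k) 1).map
        (fun i => i + if 0 ≤ d ∧ d ≤ i then 1 else 0) := by
  induction k generalizing j red with
  | zero =>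
      simp only [List.replicate_zero, pvLoopA, Nat.cast_zero, add_zero]
      rw [PySem.List.pyRange_one_eq_nil (by omega)]
      simp
  | succ m ih =>
      have hj0 : 0 ≤ j := by omega
      rw [List.replicate_succ]
      simp only [pvLoopA]
      rw [if_pos (by simp only [BEq.rfl, Bool.true_and, decide_eq_true_eq]; omega
            : ('0' == '0' && decide (j ≥ n)) = true)]
      have hcons : PySem.List.pyRange j (j + ((m:Nat) + 1 : Nat)) 1
          = j :: PySem.List.pyRange (j + 1) (j + ((m:Nat) + 1 : Nat)) 1 := by
        exact PySem.List.pyRange_one_cons (by push_cast; omega)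
      rw [hcons]
      have hend : j + (((m:Nat) + 1 : Nat) : Int) = (j + 1) + (m : Int) := by push_cast; ring
      rw [hend]
      by_cases hd : j = d
      · rw [if_pos (by simpa using hd)]
        rw [if_neg (by omega : ¬ (0 ≤ d ∧ d < j)), add_zero]
        rw [show j + 1 + 1 = (j + 1) + (if 0 ≤ d ∧ d < j + 1 then (1:Int) else 0) from by
              rw [if_pos (by omega)]]
        rw [ih (j + 1) (red ++ [j + 1]) (by omega)]
        simp only [List.map_cons, List.append_assoc, List.cons_append, List.nil_append]
        rw [if_pos (by omega : (0:Int) ≤ d ∧ d ≤ j)]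
      · rw [if_neg (by simpa using hd)]
        have h2 : (if 0 ≤ d ∧ d ≤ j then (1:Int) else 0) = (if 0 ≤ d ∧ d < j then (1:Int) else 0) := by
          by_cases h1 : 0 ≤ d ∧ d ≤ j
          · rw [if_pos h1, if_pos (by omega)]
          · rw [if_neg h1, if_neg (by omega)]
        have h3 : (if 0 ≤ d ∧ d < j + 1 then (1:Int) else 0) = (if 0 ≤ d ∧ d < j then (1:Int) else 0) := by
          by_cases h1 : 0 ≤ d ∧ d < j + 1
          · rw [if_pos h1, if_pos (by omega)]
          · rw [if_neg h1, if_neg (by omega)]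
        rw [show j + (if 0 ≤ d ∧ d < j then (1:Int) else 0) + 1
              = (j + 1) + (if 0 ≤ d ∧ d < j + 1 then (1:Int) else 0) from by rw [h3]; ring]
        rw [ih (j + 1) (red ++ [j + (if 0 ≤ d ∧ d < j then (1:Int) else 0)]) (by omega)]
        simp only [List.map_cons, List.append_assoc, List.cons_append, List.nil_append, h2]

-- ===== VERDICT (by name: the statement is the Claim_ definition above) =====
theorem dividend_shifted_extension_red_digit_cells_py_spec : Claim_equal_dividend_shifted_extension_red_digit_cells_py := by
  intro ds d e _
  unfold Spec_dividend_shifted_extension_red_digit_cells_py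
  unfold dividend_shifted_extension_red_digit_cells_py dividend_shifted_extension_red_digit_cells_py_alt
  by_cases he : e ≤ 0
  · simp [he]
  · rw [if_neg he, if_neg he]
    have hlen : PySem.Str.len ds = (ds.toList.length : Int) := by
      simp [PySem.Str.len_eq]
    simp only [hlen]
    show pvLoopA (ds.toList.length : Int) d (ds.toList ++ List.replicate e.toNat '0') 0 0 []
        = (PySem.List.pyRange (ds.toList.length : Int) ((ds.toList.length : Int) + e) 1).map
            (fun j => j + if 0 ≤ d ∧ d ≤ j then 1 else 0)
    rw [pvLoopA_prefix (ds.toList.length : Int) d ds.toList _ 0 0 [] (by omega)]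
    simp only [zero_add]
    rw [pvLoopA_zeros (ds.toList.length : Int) d e.toNat (ds.toList.length : Int) []
          (by positivity) le_rfl]
    rw [show ((ds.toList.length : Int) + (e.toNat : Int)) = (ds.toList.length : Int) + e from by omega]
    simp only [List.nil_append]
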